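-- pv_equiv track=rewrite | github.com/linba708/advent_of_code_2020 | day10.py | split_adapters_to_parts
-- ===== SOURCE A (Python) =====
-- def split_adapters_to_parts(adapters):
--     parts = []
--     i = 0
--     while i < len(adapters) - 1:
--         if adapters[i + 1] - adapters[i] == 3:
--             i += 1
--             continue
--         else:
--             j = i
--             while j < len(adapters) - 1:
--                 if adapters[j + 1] - adapters[j] == 3:
--                     break
--                 j += 1
--             if len(adapters[i:j + 1]) >= 3:
--                 parts.append(adapters[i:j + 1])
--             i = j
--     return parts
-- ===== SOURCE B (Python) =====
-- def split_adapters_to_parts(adapters):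
--     n = len(adapters)
--     breaks = [k for k in range(1, n) if adapters[k] - adapters[k - 1] == 3]
--     bounds = [0] + breaks + [n]
--     parts = []
--     for s, e in zip(bounds, bounds[1:]):
--         if e - s >= 3:
--             parts.append(adapters[s:e])
--     return parts
-- ===== Notes on version B (the rewrite author's own statement) =====
-- stated objective: simpler
-- what changed: Replaces A's index-jumping outer while with a nested inner while by a two-stage decomposition: one comprehension collects the gap-of-3 break indices, then the list is sliced between consecutive boundaries and segments of length >= 3 are kept; the comprehension/slice passes also run in C, which a timing run measured as a constant-factor speedup.
import Mathlib
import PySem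

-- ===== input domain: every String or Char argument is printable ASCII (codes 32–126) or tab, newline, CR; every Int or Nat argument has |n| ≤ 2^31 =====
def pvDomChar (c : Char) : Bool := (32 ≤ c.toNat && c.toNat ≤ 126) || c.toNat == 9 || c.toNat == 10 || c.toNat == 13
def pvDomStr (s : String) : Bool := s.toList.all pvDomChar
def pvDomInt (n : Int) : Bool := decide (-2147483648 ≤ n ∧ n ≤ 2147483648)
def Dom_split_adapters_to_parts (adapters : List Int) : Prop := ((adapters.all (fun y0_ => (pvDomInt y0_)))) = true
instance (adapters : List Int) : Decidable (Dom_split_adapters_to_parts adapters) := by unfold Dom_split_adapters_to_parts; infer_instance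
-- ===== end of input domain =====

-- B replaces A's intertwined index-jumping nested whiles by a two-stage decomposition
-- (collect the gap-of-3 boundary indices, then slice between consecutive boundaries); objective: simpler.

-- ===== PORT A =====
-- Loop counters i, j start at 0 and only grow, so they are ported as Nat; all list
-- accesses a[i], a[i+1] are in range under the loop guards, so getD is exact, and the
-- slice adapters[i:j+1] with 0 ≤ i ≤ j+1 is exactly (a.drop i).take (j+1-i).
-- Both while loops are ported with a structural fuel argument that merely bounds the
-- iteration count (the fuel supplied at each call site provably exceeds the number of
-- iterations, so the fuel-0 branch is never reached); it changes no computed value.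

-- inner while loop of A: advance j to the first index with a[j+1]-a[j]==3, or to len-1
def pvFindJ (a : List Int) : Nat → Nat → Nat
  | 0, j => j
  | fuel + 1, j =>
    if j < a.length - 1 then
      if a.getD (j + 1) 0 - a.getD j 0 = 3 then j
      else pvFindJ a fuel (j + 1)
    else j

-- outer while loop of A
def pvLoopA (a : List Int) : Nat → Nat → List (List Int)
  | 0, _ => []
  | fuel + 1, i =>
    if i < a.length - 1 then
      if a.getD (i + 1) 0 - a.getD i 0 = 3 then pvLoopA a fuel (i + 1)
      else
        -- j = pvFindJ a a.length i  (A's inner while, hoisted into the helper above)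
        (if ((a.drop i).take (pvFindJ a a.length i + 1 - i)).length ≥ 3
          then [(a.drop i).take (pvFindJ a a.length i + 1 - i)] else [])
          ++ pvLoopA a fuel (pvFindJ a a.length i)
    else []

def split_adapters_to_parts (adapters : List Int) : List (List Int) :=
  pvLoopA adapters (adapters.length + 1) 0

-- ===== PORT B =====
def split_adapters_to_parts_alt (adapters : List Int) : List (List Int) :=
  let n := adapters.length
  -- breaks = [k for k in range(1, n) if adapters[k] - adapters[k-1] == 3]
  let breaks := (List.range' 1 (n - 1)).filter
    (fun k => adapters.getD k 0 - adapters.getD (k - 1) 0 == 3)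
  let bounds := 0 :: (breaks ++ [n])
  (bounds.zip bounds.tail).foldl
    (fun parts se =>
      if se.2 - se.1 ≥ 3 then parts ++ [(adapters.drop se.1).take (se.2 - se.1)] else parts) []

-- ===== PRECONDITION & SPEC =====
def Spec_split_adapters_to_parts (adapters : List Int) (out : List (List Int)) : Prop := out = split_adapters_to_parts_alt adapters
instance (adapters : List Int) (out : List (List Int)) : Decidable (Spec_split_adapters_to_parts adapters out) := by unfold Spec_split_adapters_to_parts; infer_instance

-- ===== CLAIM (what is proved, stated in full; the proofs are below) =====
def Claim_equal_split_adapters_to_parts : Prop := ∀ (adapters : List Int), Dom_split_adapters_to_parts adapters → Spec_split_adapters_to_parts adapters (split_adapters_to_parts adapters)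

-- ===== LEMMAS AND PROOFS =====

-- the segments cut by a list of right boundaries (proof-side recursion form of B's fold)
def pvSegs (a : List Int) : Nat → List Nat → List (List Int)
  | _, [] => []
  | s, e :: rest =>
    (if e - s ≥ 3 then [(a.drop s).take (e - s)] else []) ++ pvSegs a e rest

theorem pvFold_eq_segs (a : List Int) (rest : List Nat) : ∀ (s : Nat) (acc : List (List Int)),
    ((s :: rest).zip rest).foldl
      (fun parts se =>
        if se.2 - se.1 ≥ 3 then parts ++ [(a.drop se.1).take (se.2 - se.1)] else parts) acc
      = acc ++ pvSegs a s rest := by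
  induction rest with
  | nil => intro s acc; simp [pvSegs]
  | cons e rest ih =>
    intro s acc
    simp only [List.zip_cons_cons, List.foldl_cons, ih e, pvSegs]
    split_ifs <;> simp

theorem pvFindJ_no_break (a : List Int) : ∀ (f s : Nat), a.length - 1 - s ≤ f → s ≤ a.length - 1 →
    (∀ k, s < k → k < a.length → ¬(a.getD k 0 - a.getD (k - 1) 0 = 3)) →
    pvFindJ a f s = a.length - 1 := by
  intro f
  induction f with
  | zero => intro s h1 h2 _; simp only [pvFindJ]; omega
  | succ f ihf =>
    intro s h1 h2 h3
    rw [pvFindJ]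
    split
    · rename_i hs
      rw [if_neg (fun hc => h3 (s + 1) (by omega) (by omega) (by simpa using hc))]
      exact ihf (s + 1) (by omega) (by omega) (fun k hk1 hk2 => h3 k (by omega) hk2)
    · omega

theorem pvFindJ_break (a : List Int) : ∀ (f s k : Nat), k - 1 - s ≤ f → s < k → k < a.length →
    a.getD k 0 - a.getD (k - 1) 0 = 3 →
    (∀ m, s < m → m < k → ¬(a.getD m 0 - a.getD (m - 1) 0 = 3)) →
    pvFindJ a f s = k - 1 := by
  intro f
  induction f with
  | zero => intro s k h1 h2 _ _ _; simp only [pvFindJ]; omega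
  | succ f ihf =>
    intro s k h1 h2 hkn hbrk hmin
    rw [pvFindJ]
    rw [if_pos (by omega : s < a.length - 1)]
    rcases Nat.eq_or_lt_of_le h2 with h | h
    · rw [if_pos (by rw [show s + 1 = k from h, show s = k - 1 from by omega]; exact hbrk)]
      omega
    · rw [if_neg (fun hc => hmin (s + 1) (by omega) (by omega) (by simpa using hc))]
      exact ihf (s + 1) k (by omega) (by omega) hkn hbrk (fun m hm1 hm2 => hmin m (by omega) hm2)

theorem pvLoopA_stop (a : List Int) (f j : Nat) (h : ¬ j < a.length - 1) :
    pvLoopA a f j = [] := by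
  cases f <;> simp [pvLoopA, h]

theorem pvLoopA_eq_segs (a : List Int) : ∀ (f s : Nat) (bs : List Nat),
    a.length - s ≤ f →
    (∀ k ∈ bs, s < k ∧ k < a.length ∧ a.getD k 0 - a.getD (k - 1) 0 = 3) →
    (∀ k, s < k → k < a.length → a.getD k 0 - a.getD (k - 1) 0 = 3 → k ∈ bs) →
    bs.Pairwise (· < ·) →
    pvLoopA a f s = pvSegs a s (bs ++ [a.length]) := by
  intro f
  induction f using Nat.strong_induction_on with
  | _ f ih =>
  intro s bs hm h1 h2 hp
  cases f with
  | zero =>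
    have hbs : bs = [] := by
      cases bs with
      | nil => rfl
      | cons k bs => exact absurd (h1 k (by simp)) (by omega)
    subst hbs
    simp only [pvLoopA]
    simp [pvSegs]
    omega
  | succ m =>
  cases bs with
  | nil =>
    by_cases hs : s < a.length - 1
    · have hgap : ¬(a.getD (s + 1) 0 - a.getD s 0 = 3) := by
        intro hc
        exact absurd (h2 (s + 1) (by omega) (by omega) (by simpa using hc)) (by simp)
      have hJ : pvFindJ a a.length s = a.length - 1 :=
        pvFindJ_no_break a a.length s (by omega) (by omega)
          (fun k hk1 hk2 hc => absurd (h2 k hk1 hk2 hc) (by simp))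
      rw [pvLoopA, if_pos hs, if_neg hgap, hJ, pvLoopA_stop a m (a.length - 1) (by omega)]
      have hidx : a.length - 1 + 1 - s = a.length - s := by omega
      have hlen : ((a.drop s).take (a.length - s)).length = a.length - s := by
        rw [List.length_take, List.length_drop]; omega
      simp only [hidx, hlen, List.nil_append]
      simp [pvSegs]
    · rw [pvLoopA_stop a (m + 1) s hs]
      simp [pvSegs]
      omega
  | cons k rest =>
    obtain ⟨hsk, hkn, hbrk⟩ := h1 k (by simp)
    have hrestgt : ∀ m ∈ rest, k < m := by
      intro x hx; exact (List.pairwise_cons.mp hp).1 x hx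
    have h1' : ∀ x ∈ rest, k < x ∧ x < a.length ∧ a.getD x 0 - a.getD (x - 1) 0 = 3 := by
      intro x hx
      obtain ⟨_, hx2, hx3⟩ := h1 x (by simp [hx])
      exact ⟨hrestgt x hx, hx2, hx3⟩
    have h2' : ∀ x, k < x → x < a.length → a.getD x 0 - a.getD (x - 1) 0 = 3 → x ∈ rest := by
      intro x hx1 hx2 hx3
      have := h2 x (by omega) hx2 hx3
      simp at this
      rcases this with h | h
      · omega
      · exact h
    have hp' : rest.Pairwise (· < ·) := (List.pairwise_cons.mp hp).2
    have hmin : ∀ m, s < m → m < k → ¬(a.getD m 0 - a.getD (m - 1) 0 = 3) := by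
      intro x hx1 hx2 hc
      have := h2 x hx1 (by omega) hc
      simp at this
      rcases this with h | h
      · omega
      · exact absurd (hrestgt x h) (by omega)
    rcases Nat.eq_or_lt_of_le hsk with hks | hks
    · -- k = s + 1: a break right away, A skips, segment of length 1 dropped
      have hgap : a.getD (s + 1) 0 - a.getD s 0 = 3 := by
        have := hbrk; rw [← hks] at this; simpa using this
      rw [pvLoopA, if_pos (by omega), if_pos hgap, show s + 1 = k from hks,
        ih m (by omega) k rest (by omega) h1' h2' hp']
      simp [pvSegs, ← hks]
    · -- s + 1 < k
      have hgap : ¬(a.getD (s + 1) 0 - a.getD s 0 = 3) := by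
        intro hc; exact hmin (s + 1) (by omega) (by omega) (by simpa using hc)
      have hJ : pvFindJ a a.length s = k - 1 :=
        pvFindJ_break a a.length s k (by omega) hsk hkn hbrk hmin
      rw [pvLoopA, if_pos (by omega), if_neg hgap, hJ]
      obtain ⟨m', rfl⟩ : ∃ m', m = m' + 1 := ⟨m - 1, by omega⟩
      have hstep : pvLoopA a (m' + 1) (k - 1) = pvLoopA a m' k := by
        rw [pvLoopA, if_pos (by omega : k - 1 < a.length - 1),
          if_pos (by rw [(by omega : k - 1 + 1 = k)]; simpa using hbrk),
          (by omega : k - 1 + 1 = k)]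
      rw [hstep, ih m' (by omega) k rest (by omega) h1' h2' hp']
      have hidx : k - 1 + 1 - s = k - s := by omega
      have hlen : ((a.drop s).take (k - s)).length = k - s := by
        rw [List.length_take, List.length_drop]; omega
      simp only [hidx, hlen]
      simp [pvSegs]

theorem pvAlt_eq_segs (a : List Int) :
    split_adapters_to_parts_alt a
      = pvSegs a 0 (((List.range' 1 (a.length - 1)).filter
          (fun k => a.getD k 0 - a.getD (k - 1) 0 == 3)) ++ [a.length]) := by
  unfold split_adapters_to_parts_alt
  simp only []
  rw [show (0 :: (((List.range' 1 (a.length - 1)).filter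
        (fun k => a.getD k 0 - a.getD (k - 1) 0 == 3)) ++ [a.length])).tail
      = ((List.range' 1 (a.length - 1)).filter
        (fun k => a.getD k 0 - a.getD (k - 1) 0 == 3)) ++ [a.length] from rfl]
  rw [pvFold_eq_segs]
  simp

-- ===== VERDICT (by name: the statement is the Claim_ definition above) =====
theorem split_adapters_to_parts_spec : Claim_equal_split_adapters_to_parts := by
  intro a _
  show split_adapters_to_parts a = split_adapters_to_parts_alt a
  rw [pvAlt_eq_segs]
  unfold split_adapters_to_parts
  apply pvLoopA_eq_segs a (a.length + 1) 0
  · omega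
  · intro k hk
    simp only [List.mem_filter, List.mem_range'_1, beq_iff_eq] at hk
    exact ⟨by omega, by omega, hk.2⟩
  · intro k hk1 hk2 hk3
    simp only [List.mem_filter, List.mem_range'_1, beq_iff_eq]
    exact ⟨⟨by omega, by omega⟩, hk3⟩
  · exact List.Pairwise.filter _ (List.pairwise_lt_range' (s := 1) (n := a.length - 1))
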